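-- pv_equiv track=rewrite | github.com/desigandeva/Desigan_Sayur | Python/day6/d6problem1.py | checkBal
-- ===== SOURCE A (Python) =====
-- def checkBal(string):
--     # assign initial as 0
--     c = 0
--     # check every element is balsed or not
--     for i in string:
--         if i=='(':
--             c+=1
--         elif i==')':
--             c-=1
--         elif i=='[':
--             c+=2
--         elif i==']':
--             c-=2
--         elif i=='{':
--             c+=3
--         elif i=='}':
--             c-=3
--     # if c is 0 then return true (it's balansed)
--     if c==0:
--         return True
--     # if c not 0 then return false (it's unbalanced)
--     else:
--         return False
-- ===== SOURCE B (Python) =====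
-- _W = {'(': 1, ')': -1, '[': 2, ']': -2, '{': 3, '}': -3}
--
-- def _balance(s, lo, hi):
--     # weighted bracket balance of s[lo:hi], by divide and conquer
--     if hi - lo == 0:
--         return 0
--     if hi - lo == 1:
--         return _W.get(s[lo], 0)
--     mid = (lo + hi) // 2
--     return _balance(s, lo, mid) + _balance(s, mid, hi)
--
-- def checkBal(string):
--     return _balance(string, 0, len(string)) == 0
-- ===== Notes on version B (the rewrite author's own statement) =====
-- stated objective: alternative
-- what changed: Replaced A's single left-to-right accumulating branch scan with a divide-and-conquer recursion that splits the string in half, computes each half's weighted balance via a weight table at the leaves, and sums the two halves.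
import Mathlib
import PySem

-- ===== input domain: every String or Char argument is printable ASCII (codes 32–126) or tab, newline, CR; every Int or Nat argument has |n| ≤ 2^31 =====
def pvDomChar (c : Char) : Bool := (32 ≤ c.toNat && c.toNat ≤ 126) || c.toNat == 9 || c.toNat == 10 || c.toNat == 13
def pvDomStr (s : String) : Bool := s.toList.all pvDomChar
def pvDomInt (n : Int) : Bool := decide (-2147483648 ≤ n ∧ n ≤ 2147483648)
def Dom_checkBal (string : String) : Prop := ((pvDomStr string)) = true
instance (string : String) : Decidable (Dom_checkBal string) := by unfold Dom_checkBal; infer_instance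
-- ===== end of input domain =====

-- B computes the weighted bracket balance by divide-and-conquer over halves of the
-- string, consulting a weight table at single-character leaves, instead of A's
-- single accumulating branch-per-character scan. (objective: alternative)

-- ===== PORT A =====
def checkBal (string : String) : Bool :=
  let c : Int := string.toList.foldl
    (fun c i =>
      if i == '(' then c + 1
      else if i == ')' then c - 1
      else if i == '[' then c + 2
      else if i == ']' then c - 2
      else if i == '{' then c + 3
      else if i == '}' then c - 3
      else c) 0
  if c == 0 then true else false

-- ===== PORT B =====
def pvWTable : PySem.Dict Char Int :=
  PySem.Dict.ofList [('(', 1), (')', -1), ('[', 2), (']', -2), ('{', 3), ('}', -3)]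

def pvBalance (s : List Char) (lo hi : Nat) : Int :=
  if hi - lo = 0 then 0
  else if hi - lo = 1 then
    match PySem.List.pyGet? s (lo : Int) with
    | some c => pvWTable.getD c 0
    | none => 0        -- unreachable when lo is in range (Python s[lo])
  else
    pvBalance s lo ((lo + hi) / 2) + pvBalance s ((lo + hi) / 2) hi
termination_by hi - lo
decreasing_by all_goals omega

def checkBal_alt (string : String) : Bool :=
  pvBalance string.toList 0 string.toList.length == 0

-- ===== PRECONDITION & SPEC =====
def Spec_checkBal (string : String) (out : Bool) : Prop := out = checkBal_alt string
instance (string : String) (out : Bool) : Decidable (Spec_checkBal string out) := by unfold Spec_checkBal; infer_instance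

-- ===== CLAIM (what is proved, stated in full; the proofs are below) =====
def Claim_equal_checkBal : Prop := ∀ (string : String), Dom_checkBal string → Spec_checkBal string (checkBal string)

-- ===== LEMMAS AND PROOFS =====

-- the weight table as a closed if-chain
theorem pvW_eval (x : Char) : pvWTable.getD x 0 =
    (if x = '(' then 1 else if x = ')' then -1 else if x = '[' then 2 else if x = ']' then -2
     else if x = '{' then 3 else if x = '}' then -3 else 0 : Int) := by
  by_cases h1 : x = '('
  · subst h1; decide
  by_cases h2 : x = ')'
  · subst h2; decide
  by_cases h3 : x = '['
  · subst h3; decide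
  by_cases h4 : x = ']'
  · subst h4; decide
  by_cases h5 : x = '{'
  · subst h5; decide
  by_cases h6 : x = '}'
  · subst h6; decide
  have hitems : pvWTable.items = [('(', 1), (')', -1), ('[', 2), (']', -2), ('{', 3), ('}', -3)] := by decide
  have hf : pvWTable.get? x = none := by
    have hnone : List.find? (fun p : Char × Int => p.1 == x)
        [('(', 1), (')', -1), ('[', 2), (']', -2), ('{', 3), ('}', -3)] = none := by
      rw [List.find?_eq_none]
      intro p hp
      simp only [List.mem_cons, List.not_mem_nil, or_false] at hp
      rcases hp with h|h|h|h|h|h <;> subst h <;> simp [beq_iff_eq] <;>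
        first
        | exact fun h' => h1 h'.symm
        | exact fun h' => h2 h'.symm
        | exact fun h' => h3 h'.symm
        | exact fun h' => h4 h'.symm
        | exact fun h' => h5 h'.symm
        | exact fun h' => h6 h'.symm
    rw [PySem.Dict.get?, hitems, hnone]
    rfl
  simp [PySem.Dict.getD, hf, h1, h2, h3, h4, h5, h6]

-- prefix sum of weights: pvS l k = sum of weights of the first k characters
def pvS (l : List Char) (k : Nat) : Int := ((l.take k).map (fun c => pvWTable.getD c 0)).sum

theorem pvS_succ (l : List Char) (k : Nat) (hk : k < l.length) :
    pvS l (k + 1) = pvS l k + pvWTable.getD l[k] 0 := by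
  rw [pvS, List.take_add_one, List.getElem?_eq_getElem hk]
  rw [List.map_append, List.sum_append, pvS]
  simp

theorem pvBalance_eq (l : List Char) (lo hi : Nat) (h1 : lo ≤ hi) (h2 : hi ≤ l.length) :
    pvBalance l lo hi = pvS l hi - pvS l lo := by
  rw [pvBalance]
  split_ifs with h0 hone
  · have : hi = lo := by omega
    simp [this]
  · have hhi : hi = lo + 1 := by omega
    have hlt : lo < l.length := by omega
    rw [PySem.List.pyGet?_ofNat (h := hlt)]
    simp [hhi, pvS_succ l lo hlt]
  · rw [pvBalance_eq l lo ((lo + hi) / 2) (by omega) (by omega),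
        pvBalance_eq l ((lo + hi) / 2) hi (by omega) h2]
    ring
termination_by hi - lo
decreasing_by all_goals omega

theorem pvStep_eq (c : Int) (x : Char) :
    (if x == '(' then c + 1
     else if x == ')' then c - 1
     else if x == '[' then c + 2
     else if x == ']' then c - 2
     else if x == '{' then c + 3
     else if x == '}' then c - 3
     else c) = c + pvWTable.getD x 0 := by
  rw [pvW_eval]
  simp only [beq_iff_eq]
  split_ifs <;> ring

theorem checkBal_foldl_eq (l : List Char) (c : Int) :
    l.foldl
      (fun c i =>
        if i == '(' then c + 1
        else if i == ')' then c - 1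
        else if i == '[' then c + 2
        else if i == ']' then c - 2
        else if i == '{' then c + 3
        else if i == '}' then c - 3
        else c) c
    = c + (l.map (fun ch => pvWTable.getD ch 0)).sum := by
  induction l generalizing c with
  | nil => simp
  | cons x xs ih =>
    rw [List.foldl_cons, pvStep_eq, ih, List.map_cons, List.sum_cons]
    ring

theorem decide_eq_beq_int (a b : Int) : decide (a = b) = (a == b) := by
  cases h : a == b
  · simp_all
  · simp_all

-- ===== VERDICT (by name: the statement is the Claim_ definition above) =====
theorem checkBal_spec : Claim_equal_checkBal := by
  intro s _
  unfold Spec_checkBal checkBal checkBal_alt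
  rw [checkBal_foldl_eq, pvBalance_eq s.toList 0 s.toList.length (Nat.zero_le _) le_rfl]
  rw [pvS, pvS, List.take_length, List.take_zero]
  simp
  rw [decide_eq_beq_int]
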